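-- pv_equiv track=rewrite | github.com/FiniteSingularity/aoc-2022 | 14/code.py | flow_the_sand
-- ===== SOURCE A (Python) =====
-- def flow_the_sand(scan: list[list[str]], start_idx: tuple[int, int]) -> tuple[list[list[int]],  int]:
--     """
--     Flow the sand
--     """
--     sand_count = 0
--     to_the_void = False
--     moves: list[tuple[int, int]] = [start_idx]
--
--     while not to_the_void:
--         row, col = moves[-1]
--         while True:
--             if row + 1 >= len(scan):
--                 to_the_void = True
--                 break
--             below = scan[row+1][col-1:col+2]
--             if below[1] == '.':
--                 row += 1
--             elif below[0] == '.':
--                 row += 1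
--                 col -= 1
--             elif below[2] == '.':
--                 row += 1
--                 col += 1
--             else:
--                 scan[row][col] = 'O'
--                 sand_count += 1
--                 moves.pop()
--                 break
--             moves.append((row, col))
--     return scan, sand_count
-- ===== SOURCE B (Python) =====
-- def flow_the_sand(scan: list[list[str]], start_idx: tuple[int, int]) -> tuple[list[list[str]], int]:
--     """Flow the sand: release one grain at a time, each falling afresh from start_idx.
--
--     No path stack: a grain walks down choosing the first free cell among
--     (below, below-left, below-right); it settles where none is free, and the
--     function returns when a grain falls past the last row.
--     """
--     height = len(scan)
--     sand_count = 0
--     settled = True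
--     while settled:
--         row, col = start_idx
--         while row + 1 < height:
--             below = scan[row + 1]
--             for c in (col, col - 1, col + 1):
--                 if 0 <= c < len(below) and below[c] == '.':
--                     row, col = row + 1, c
--                     break
--             else:
--                 scan[row][col] = 'O'
--                 sand_count += 1
--                 break
--         else:
--             settled = False
--     return scan, sand_count
-- ===== Notes on version B (the rewrite author's own statement) =====
-- stated objective: simpler
-- what changed: B removes A's `moves` path stack and its pop/resume bookkeeping entirely: each grain is released afresh from start_idx, walks down via a single first-free-of-three-cells scan (index tests instead of A's three-cell slice), and the function returns as soon as a grain falls past the last row.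
import Mathlib
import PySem

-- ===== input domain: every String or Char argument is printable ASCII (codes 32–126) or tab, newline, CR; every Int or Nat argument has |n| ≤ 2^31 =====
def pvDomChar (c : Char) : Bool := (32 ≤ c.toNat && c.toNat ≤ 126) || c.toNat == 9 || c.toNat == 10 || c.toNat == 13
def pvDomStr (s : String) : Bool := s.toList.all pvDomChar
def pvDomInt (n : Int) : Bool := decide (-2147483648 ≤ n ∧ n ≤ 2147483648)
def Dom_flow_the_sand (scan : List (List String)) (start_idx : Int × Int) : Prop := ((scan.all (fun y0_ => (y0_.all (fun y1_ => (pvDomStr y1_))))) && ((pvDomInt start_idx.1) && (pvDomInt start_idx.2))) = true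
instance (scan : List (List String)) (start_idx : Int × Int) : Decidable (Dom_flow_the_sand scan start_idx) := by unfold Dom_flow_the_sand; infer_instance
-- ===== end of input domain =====

-- B releases each grain afresh from start_idx with no `moves` stack, walking it down by a
-- first-free-of-three-cells scan instead of A's slice-and-branch chain (objective: simpler).
-- Both Pythons mutate `scan` in place identically; the equivalence proved is about the return value.

-- ===== PORT A =====
-- One step of A's inner `while True` descent.  The Python stack `moves` (append / moves[-1] /
-- pop at the END) is represented head-first: append = cons, moves[-1] = head, pop = tail.
-- `none` marks the points where the Python raises (IndexError) or fuel runs out; `fuel` only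
-- makes the recursion structural and is sufficient on every input Pre_ admits.
def flowInnerA (fuel : Nat) (scan : List (List String)) (row col : Int)
    (moves : List (Int × Int)) : Option (Bool × List (List String) × List (Int × Int)) :=
  match fuel with
  | 0 => none
  | fuel + 1 =>
    if (scan.length : Int) ≤ row + 1 then some (true, scan, moves)
    else
      match PySem.List.pyGet? scan (row + 1) with
      | none => none
      | some rowBelow =>
        let below := PySem.List.slice rowBelow (some (col - 1)) (some (col + 2))
        match PySem.List.pyGet? below 1 with
        | none => none
        | some b1 =>
          if b1 == "." then flowInnerA fuel scan (row + 1) col ((row + 1, col) :: moves)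
          else
            match PySem.List.pyGet? below 0 with
            | none => none
            | some b0 =>
              if b0 == "." then flowInnerA fuel scan (row + 1) (col - 1) ((row + 1, col - 1) :: moves)
              else
                match PySem.List.pyGet? below 2 with
                | none => none
                | some b2 =>
                  if b2 == "." then flowInnerA fuel scan (row + 1) (col + 1) ((row + 1, col + 1) :: moves)
                  else
                    match PySem.List.pyGet? scan row with
                    | none => none
                    | some r =>
                      match PySem.List.pySet? r col "O" with
                      | none => none
                      | some r' =>
                        match PySem.List.pySet? scan row r' with
                        | none => none
                        | some scan' => some (false, scan', moves.tail)

-- A's outer `while not to_the_void` loop: read moves[-1], run the descent, on settle bump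
-- sand_count and continue.  On a raise point (none, including the empty stack) the port
-- returns the state so far — all such inputs lie outside Pre_.
def flowOuterA (fuel : Nat) (scan : List (List String)) (sand_count : Int)
    (moves : List (Int × Int)) : List (List String) × Int :=
  match fuel with
  | 0 => (scan, sand_count)
  | fuel + 1 =>
    match moves with
    | [] => (scan, sand_count)
    | (row, col) :: rest =>
      match flowInnerA (scan.length + 2) scan row col ((row, col) :: rest) with
      | none => (scan, sand_count)
      | some (true, scan', _) => (scan', sand_count)
      | some (false, scan', moves') => flowOuterA fuel scan' (sand_count + 1) moves'

def flow_the_sand (scan : List (List String)) (start_idx : Int × Int) : List (List String) × Int :=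
  flowOuterA (scan.foldl (fun a r => a + r.length) 0 + 2) scan 0 [start_idx]

-- ===== PORT B =====
-- Source B's `for c in (col, col-1, col+1): if 0 <= c < len(below) and below[c] == '.'`.
def pickNext (below : List String) (col : Int) : Option Int :=
  [col, col - 1, col + 1].find? (fun c =>
    decide (0 ≤ c) && decide (c < (below.length : Int)) && (below.getD c.toNat "" == "."))

-- One grain's walk down from (row, col): Source B's inner `while row + 1 < height` loop.
-- some (true, scan') = it settled, some (false, scan) = it fell past the last row.
def dropGrainB (fuel : Nat) (scan : List (List String)) (row col : Int) :
    Option (Bool × List (List String)) :=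
  match fuel with
  | 0 => none
  | fuel + 1 =>
    if row + 1 < (scan.length : Int) then
      match PySem.List.pyGet? scan (row + 1) with
      | none => none
      | some below =>
        match pickNext below col with
        | some c => dropGrainB fuel scan (row + 1) c
        | none =>
          match PySem.List.pyGet? scan row with
          | none => none
          | some r =>
            match PySem.List.pySet? r col "O" with
            | none => none
            | some r' =>
              match PySem.List.pySet? scan row r' with
              | none => none
              | some scan' => some (true, scan')
    else some (false, scan)

-- Source B's outer `while settled` loop: one grain per iteration, always from start_idx.
def flowOuterB (fuel : Nat) (scan : List (List String)) (sand_count : Int)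
    (start_idx : Int × Int) : List (List String) × Int :=
  match fuel with
  | 0 => (scan, sand_count)
  | fuel + 1 =>
    match dropGrainB (scan.length + 2) scan start_idx.1 start_idx.2 with
    | none => (scan, sand_count)
    | some (true, scan') => flowOuterB fuel scan' (sand_count + 1) start_idx
    | some (false, scan') => (scan', sand_count)

def flow_the_sand_alt (scan : List (List String)) (start_idx : Int × Int) : List (List String) × Int :=
  flowOuterB (scan.foldl (fun a r => a + r.length) 0 + 2) scan 0 start_idx

-- ===== PRECONDITION & SPEC =====
-- `closRow rows` marks, for the FIRST row of `rows`, which cells can ever be permanently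
-- plugged: a cell is marked iff it is initially non-'.' or the three cells under it are all
-- marked (a settled grain needs all three cells below it blocked).  Bottom-up DP, no simulation.
def getBN (bs : List Bool) (i : Int) : Bool :=
  if 0 ≤ i then bs.getD i.toNat false else false

def closRow : List (List String) → List Bool
  | [] => []
  | row :: rest =>
    (List.range row.length).map (fun c =>
      decide (row.getD c "" ≠ ".") ||
        (getBN (closRow rest) ((c : Int) - 1) && getBN (closRow rest) (c : Int) &&
          getBN (closRow rest) ((c : Int) + 1)))

def closAt (scan : List (List String)) (r c : Int) : Bool :=
  getBN (closRow (scan.drop r.toNat)) c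

-- Pre_ admits: (1) starts already past the last row (A returns (scan, 0) at once); (2) a clear
-- chute straight below the source (the grain falls through and A returns (scan, 0)); (3) the
-- real simulations: rectangular grids (width ≥ 3) with non-'.' wall columns on both sides,
-- source strictly inside, whose three cells under the source can never all be plugged (closRow)
-- — there A settles grain after grain and returns when one reaches the void.  Excluded are the
-- inputs where A raises IndexError (ragged/unwalled grids the walk can step out of, and sources
-- that get plugged, where A pops the stack empty), together with two corners on which A does
-- return a value: unwalled grids whose grain happens to drift out to the void, and negative
-- start rows, where Python's negative-index wraparound walks rows from the wrong end.
def Pre_flow_the_sand (scan : List (List String)) (start_idx : Int × Int) : Prop :=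
  (scan.length : Int) ≤ start_idx.1 + 1 ∨
  (0 ≤ start_idx.1 ∧ 1 ≤ start_idx.2 ∧
    ∀ r ∈ scan.drop (start_idx.1 + 1).toNat,
      start_idx.2 < (r.length : Int) ∧ r.getD start_idx.2.toNat "" = ".") ∨
  (0 ≤ start_idx.1 ∧ start_idx.1 + 1 < (scan.length : Int) ∧
    3 ≤ (scan.headD []).length ∧
    (∀ r ∈ scan, r.length = (scan.headD []).length ∧
      r.getD 0 "" ≠ "." ∧ r.getD ((scan.headD []).length - 1) "" ≠ ".") ∧
    1 ≤ start_idx.2 ∧ start_idx.2 ≤ ((scan.headD []).length : Int) - 2 ∧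
    ¬(closAt scan (start_idx.1 + 1) (start_idx.2 - 1) = true ∧
      closAt scan (start_idx.1 + 1) start_idx.2 = true ∧
      closAt scan (start_idx.1 + 1) (start_idx.2 + 1) = true))
instance (scan : List (List String)) (start_idx : Int × Int) :
    Decidable (Pre_flow_the_sand scan start_idx) := by
  unfold Pre_flow_the_sand; infer_instance

def pvWitness_flow_the_sand : List (List String) × (Int × Int) :=
  ([["#", ".", ".", ".", ".", ".", "#"],
    ["#", ".", ".", ".", ".", ".", "#"],
    ["#", "#", "#", "#", ".", ".", "#"],
    ["#", ".", ".", ".", ".", ".", "#"]], (0, 2))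

def Spec_flow_the_sand (scan : List (List String)) (start_idx : Int × Int)
    (out : List (List String) × Int) : Prop := out = flow_the_sand_alt scan start_idx
instance (scan : List (List String)) (start_idx : Int × Int) (out : List (List String) × Int) :
    Decidable (Spec_flow_the_sand scan start_idx out) := by
  unfold Spec_flow_the_sand; infer_instance

-- ===== CLAIM =====
def Claim_equal_flow_the_sand : Prop := ∀ (scan : List (List String)) (start_idx : Int × Int), Dom_flow_the_sand scan start_idx → Pre_flow_the_sand scan start_idx → Spec_flow_the_sand scan start_idx (flow_the_sand scan start_idx)

-- ===== LEMMAS AND PROOFS =====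

-- Proof-side vocabulary -------------------------------------------------------------------

/-- The cell of `scan` at (r, c), for 0 ≤ r, 0 ≤ c; "" past the edges. -/
def cellS (scan : List (List String)) (r c : Int) : String :=
  (scan.getD r.toNat []).getD c.toNat ""

/-- Rectangular of width w (≥ 3) with non-'.' wall columns 0 and w-1. -/
def RW (scan : List (List String)) (w : Nat) : Prop :=
  3 ≤ w ∧ ∀ r ∈ scan, r.length = w ∧ r.getD 0 "" ≠ "." ∧ r.getD (w - 1) "" ≠ "."

/-- The single move a falling grain makes at p (none: void reached, a raise point, or settle). -/
def step (scan : List (List String)) (p : Int × Int) : Option (Int × Int) :=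
  if p.1 + 1 < (scan.length : Int) then
    match PySem.List.pyGet? scan (p.1 + 1) with
    | none => none
    | some below => (pickNext below p.2).map (fun c => (p.1 + 1, c))
  else none

/-- A's stack (head-first) is the reversed fall path from the source. -/
inductive IsStack (scan : List (List String)) (st : Int × Int) : List (Int × Int) → Prop
  | base : IsStack scan st [st]
  | push {p : Int × Int} {s : List (Int × Int)} {q : Int × Int} :
      IsStack scan st (p :: s) → step scan p = some q → IsStack scan st (q :: p :: s)

/-- Write 'O' at (r, c). -/
def settleAt (scan : List (List String)) (r c : Int) : List (List String) :=
  scan.set r.toNat ((scan.getD r.toNat []).set c.toNat "O")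

/-- What a partially-filled grid retains of the original: shape, walls (non-'.' cells never
    revert) and the fact that every blocked cell was marked pluggable by `closRow scan₀`. -/
def SandInv (scan₀ scan : List (List String)) : Prop :=
  scan.length = scan₀.length ∧
  (∀ i : Nat, (scan.getD i []).length = (scan₀.getD i []).length) ∧
  (∀ r c : Int, cellS scan₀ r c ≠ "." → cellS scan₀ r c = cellS scan r c) ∧
  (∀ r c : Int, 0 ≤ r → r < (scan.length : Int) → 0 ≤ c →
    c < ((scan.getD r.toNat []).length : Int) → cellS scan r c ≠ "." → closAt scan₀ r c = true)

-- Small indexing lemmas -------------------------------------------------------------------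

lemma getD_eq_getElem_of_lt {α : Type} [Inhabited α] (l : List α) (i : Nat) (d : α)
    (h : i < l.length) : l.getD i d = l[i] := by
  simp [List.getD_eq_getElem?_getD, List.getElem?_eq_getElem h]

lemma sliceGetIdx (rb : List String) (c i : Int) (h0 : 1 ≤ c) (hi0 : 0 ≤ i) (hi : i < 3)
    (hlt : c - 1 + i < (rb.length : Int)) :
    PySem.List.pyGet? (PySem.List.slice rb (some (c - 1)) (some (c + 2))) i
        = some (rb.getD (c - 1 + i).toNat "") := by
  rw [PySem.List.slice_toNat _ (by omega) (by omega)]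
  rw [PySem.List.pyGet?_of_nonneg _ hi0]
  rw [List.getElem?_take, if_pos (by omega), List.getElem?_drop]
  rw [List.getD_eq_getElem?_getD]
  rw [show (c - 1).toNat + i.toNat = (c - 1 + i).toNat from by omega]
  cases h : rb[(c - 1 + i).toNat]? with
  | none => rw [List.getElem?_eq_none_iff] at h; omega
  | some v => rfl

lemma sliceGet3 (rb : List String) (c : Int) (h0 : 1 ≤ c) (h1 : c + 2 ≤ (rb.length : Int)) :
    PySem.List.pyGet? (PySem.List.slice rb (some (c - 1)) (some (c + 2))) 0
        = some (rb.getD (c - 1).toNat "") ∧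
    PySem.List.pyGet? (PySem.List.slice rb (some (c - 1)) (some (c + 2))) 1
        = some (rb.getD c.toNat "") ∧
    PySem.List.pyGet? (PySem.List.slice rb (some (c - 1)) (some (c + 2))) 2
        = some (rb.getD (c + 1).toNat "") := by
  refine ⟨?_, ?_, ?_⟩
  · have h := sliceGetIdx rb c 0 h0 (by omega) (by omega) (by omega)
    rwa [show (c - 1 + (0:Int)) = c - 1 from by ring] at h
  · have h := sliceGetIdx rb c 1 h0 (by omega) (by omega) (by omega)
    rwa [show (c - 1 + (1:Int)) = c from by ring] at h
  · have h := sliceGetIdx rb c 2 h0 (by omega) (by omega) (by omega)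
    rwa [show (c - 1 + (2:Int)) = c + 1 from by ring] at h

lemma sliceMid (rb : List String) (c : Int) (h0 : 1 ≤ c) (h1 : c < (rb.length : Int)) :
    PySem.List.pyGet? (PySem.List.slice rb (some (c - 1)) (some (c + 2))) 1
        = some (rb.getD c.toNat "") := by
  have h := sliceGetIdx rb c 1 h0 (by omega) (by omega) (by omega)
  rwa [show (c - 1 + (1:Int)) = c from by ring] at h

lemma pickNext_eq (below : List String) (c : Int) (h0 : 1 ≤ c)
    (h1 : c + 2 ≤ (below.length : Int)) :
    pickNext below c =
      (if below.getD c.toNat "" = "." then some c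
       else if below.getD (c - 1).toNat "" = "." then some (c - 1)
       else if below.getD (c + 1).toNat "" = "." then some (c + 1) else none) := by
  unfold pickNext
  by_cases hA : below.getD c.toNat "" = "."
  · rw [List.find?_cons_of_pos (by
      rw [decide_eq_true (show (0:Int) ≤ c from by omega),
        decide_eq_true (show c < (below.length : Int) from by omega), hA]; simp), if_pos hA]
  · rw [List.find?_cons_of_neg (by
      simp only [Bool.and_eq_true, decide_eq_true_eq, beq_iff_eq]
      exact fun h => hA h.2)]
    by_cases hB : below.getD (c - 1).toNat "" = "."
    · rw [List.find?_cons_of_pos (by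
        rw [decide_eq_true (show (0:Int) ≤ c - 1 from by omega),
          decide_eq_true (show c - 1 < (below.length : Int) from by omega), hB]; simp),
        if_neg hA, if_pos hB]
    · rw [List.find?_cons_of_neg (by
        simp only [Bool.and_eq_true, decide_eq_true_eq, beq_iff_eq]
        exact fun h => hB h.2)]
      by_cases hC : below.getD (c + 1).toNat "" = "."
      · rw [List.find?_cons_of_pos (by
          rw [decide_eq_true (show (0:Int) ≤ c + 1 from by omega),
            decide_eq_true (show c + 1 < (below.length : Int) from by omega), hC]; simp),
          if_neg hA, if_neg hB, if_pos hC]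
      · rw [List.find?_cons_of_neg (by
          simp only [Bool.and_eq_true, decide_eq_true_eq, beq_iff_eq]
          exact fun h => hC h.2), if_neg hA, if_neg hB, if_neg hC]
        rfl

lemma pickNext_some_facts (below : List String) (c c' : Int)
    (h : pickNext below c = some c') :
    (c' = c ∨ c' = c - 1 ∨ c' = c + 1) ∧ 0 ≤ c' ∧ c' < (below.length : Int) ∧
      below.getD c'.toNat "" = "." := by
  have hm := List.mem_of_find?_eq_some h
  have hp := List.find?_some h
  simp only [Bool.and_eq_true, decide_eq_true_eq, beq_iff_eq] at hp
  simp only [List.mem_cons, List.not_mem_nil, or_false] at hm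
  exact ⟨hm, hp.1.1, hp.1.2, hp.2⟩

-- closRow ---------------------------------------------------------------------------------

lemma closRow_getBN (row : List String) (rest : List (List String)) (c : Int) (h0 : 0 ≤ c)
    (hc : c < (row.length : Int)) :
    getBN (closRow (row :: rest)) c =
      (decide (row.getD c.toNat "" ≠ ".") ||
        (getBN (closRow rest) (c - 1) && getBN (closRow rest) c &&
          getBN (closRow rest) (c + 1))) := by
  have hlt : c.toNat < row.length := by omega
  rw [closRow, getBN, if_pos h0]
  rw [getD_eq_getElem_of_lt _ _ _ (by simpa using hlt)]
  simp only [List.getElem_map, List.getElem_range]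
  rw [show ((c.toNat : Int)) = c from by omega]

lemma closAt_drop (scan : List (List String)) (r : Int)
    (hr : r.toNat < scan.length) :
    closRow (scan.drop r.toNat) = closRow (scan[r.toNat] :: scan.drop (r.toNat + 1)) := by
  rw [← List.drop_eq_getElem_cons hr]

lemma closAt_base (scan : List (List String)) (r c : Int) (h0 : 0 ≤ r)
    (hr : r < (scan.length : Int)) (hc0 : 0 ≤ c)
    (hc : c < ((scan.getD r.toNat []).length : Int))
    (hcell : cellS scan r c ≠ ".") : closAt scan r c = true := by
  have hrl : r.toNat < scan.length := by omega
  unfold closAt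
  rw [closAt_drop scan r hrl,
    closRow_getBN _ _ c hc0 (by
      rwa [getD_eq_getElem_of_lt _ _ _ hrl] at hc)]
  have hx : scan[r.toNat].getD c.toNat "" ≠ "." := by
    unfold cellS at hcell
    rwa [getD_eq_getElem_of_lt _ _ _ hrl] at hcell
  rw [List.getD_eq_getElem?_getD] at hx
  simp [hx]

lemma closAt_stepUp (scan : List (List String)) (r c : Int) (h0 : 0 ≤ r)
    (hr : r < (scan.length : Int)) (hc0 : 0 ≤ c)
    (hc : c < ((scan.getD r.toNat []).length : Int))
    (h1 : closAt scan (r + 1) (c - 1) = true) (h2 : closAt scan (r + 1) c = true)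
    (h3 : closAt scan (r + 1) (c + 1) = true) : closAt scan r c = true := by
  have hrl : r.toNat < scan.length := by omega
  unfold closAt
  rw [closAt_drop scan r hrl,
    closRow_getBN _ _ c hc0 (by rwa [getD_eq_getElem_of_lt _ _ _ hrl] at hc)]
  unfold closAt at h1 h2 h3
  rw [show (r + 1).toNat = r.toNat + 1 from by omega] at h1 h2 h3
  simp [h1, h2, h3]

-- settleAt --------------------------------------------------------------------------------

lemma length_settleAt (scan : List (List String)) (r c : Int) :
    (settleAt scan r c).length = scan.length := by
  simp [settleAt]

lemma rowLen_settleAt (scan : List (List String)) (r c : Int) (i : Nat) :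
    ((settleAt scan r c).getD i []).length = ((scan.getD i []).length) := by
  unfold settleAt
  rw [List.getD_eq_getElem?_getD (l := scan.set _ _), List.getElem?_set]
  by_cases he : r.toNat = i
  · subst he
    rw [if_pos rfl]
    by_cases hlt : r.toNat < scan.length
    · rw [if_pos hlt]
      simp
    · rw [if_neg hlt,
        List.getD_eq_getElem?_getD (l := scan),
        List.getElem?_eq_none (by omega : scan.length ≤ r.toNat)]
  · rw [if_neg he, ← List.getD_eq_getElem?_getD]

lemma pyGet?_settleAt_ne (scan : List (List String)) (qr qc r : Int) (h0 : 0 ≤ r)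
    (hne : r.toNat ≠ qr.toNat) :
    PySem.List.pyGet? (settleAt scan qr qc) r = PySem.List.pyGet? scan r := by
  rw [PySem.List.pyGet?_of_nonneg _ h0, PySem.List.pyGet?_of_nonneg _ h0, settleAt,
    List.getElem?_set_ne (by omega)]

lemma cellS_settleAt (scan : List (List String)) (qr qc : Int)
    (hqrl : qr.toNat < scan.length)
    (hqcl : qc.toNat < (scan.getD qr.toNat []).length) (r c : Int) :
    cellS (settleAt scan qr qc) r c =
      if r.toNat = qr.toNat ∧ c.toNat = qc.toNat then "O" else cellS scan r c := by
  unfold cellS settleAt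
  rw [List.getD_eq_getElem?_getD (l := scan.set qr.toNat _), List.getElem?_set]
  by_cases hr : qr.toNat = r.toNat
  · rw [if_pos hr, if_pos hqrl]
    simp only [Option.getD_some]
    by_cases hc : c.toNat = qc.toNat
    · rw [if_pos ⟨hr.symm, hc⟩, hc]
      rw [List.getD_eq_getElem?_getD, List.getElem?_set, if_pos rfl, if_pos hqcl]
      rfl
    · rw [if_neg (by tauto)]
      rw [List.getD_eq_getElem?_getD, List.getElem?_set, if_neg (by omega)]
      rw [← hr, ← List.getD_eq_getElem?_getD]
  · rw [if_neg hr, if_neg (by tauto), ← List.getD_eq_getElem?_getD]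

-- step / IsStack --------------------------------------------------------------------------

lemma step_some_elim {scan : List (List String)} {p q : Int × Int}
    (h : step scan p = some q) :
    p.1 + 1 < (scan.length : Int) ∧ q.1 = p.1 + 1 ∧
      ∃ below, PySem.List.pyGet? scan (p.1 + 1) = some below ∧
        pickNext below p.2 = some q.2 := by
  unfold step at h
  split at h
  · rename_i hlt
    cases hget : PySem.List.pyGet? scan (p.1 + 1) with
    | none => rw [hget] at h; simp at h
    | some below =>
      rw [hget] at h
      dsimp only at h
      cases hpick : pickNext below p.2 with
      | none => rw [hpick] at h; simp at h
      | some c' =>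
        rw [hpick] at h
        simp only [Option.map_some, Option.some.injEq] at h
        subst h
        exact ⟨hlt, rfl, below, rfl, hpick⟩
  · simp at h

lemma step_bounds (scan : List (List String)) (w : Nat) (hRW : RW scan w)
    (p q : Int × Int) (hp : 0 ≤ p.1) (h : step scan p = some q) :
    q.1 = p.1 + 1 ∧ 0 ≤ q.1 ∧ 1 ≤ q.2 ∧ q.2 ≤ (w : Int) - 2 := by
  obtain ⟨hlt, hq1, below, hget, hpick⟩ := step_some_elim h
  obtain ⟨_, hb0, hbl, hdot⟩ := pickNext_some_facts below p.2 q.2 hpick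
  have hmem : below ∈ scan := PySem.List.mem_of_pyGet?_eq_some _ hget
  obtain ⟨hlen, hw0, hw1⟩ := hRW.2 below hmem
  have hw3 := hRW.1
  have hne0 : q.2.toNat ≠ 0 := fun h0 => hw0 (by rwa [← h0])
  have hnew : q.2.toNat ≠ w - 1 := by
    intro h0; apply hw1; rw [← h0]; exact hdot
  exact ⟨hq1, by omega, by omega, by omega⟩

lemma IsStack_elem_facts (scan : List (List String)) (st : Int × Int) (w : Nat)
    (hRW : RW scan w) (h0 : 0 ≤ st.1) (hc1 : 1 ≤ st.2) (hc2 : st.2 ≤ (w : Int) - 2) :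
    ∀ s, IsStack scan st s → ∀ p ∈ s, 0 ≤ p.1 ∧ 1 ≤ p.2 ∧ p.2 ≤ (w : Int) - 2 := by
  intro s hs
  induction hs with
  | base => intro p hp; simp at hp; subst hp; exact ⟨h0, hc1, hc2⟩
  | push hstk hstep ih =>
    intro x hx
    rename_i p s' q
    rcases List.mem_cons.1 hx with hq | hrest
    · subst hq
      have hp0 := (ih p (by simp)).1
      obtain ⟨_, a, b, c⟩ := step_bounds scan w hRW p x hp0 hstep
      exact ⟨a, b, c⟩
    · exact ih x hrest

lemma IsStack_rows_lt {scan : List (List String)} {st : Int × Int} :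
    ∀ {p : Int × Int} {s : List (Int × Int)}, IsStack scan st (p :: s) →
      ∀ x ∈ s, x.1 < p.1 := by
  intro p s h
  generalize hps : p :: s = l at h
  induction h generalizing p s with
  | base =>
    cases hps
    intro x hx; simp at hx
  | push hstk hstep ih =>
    rename_i p' s' q'
    cases hps
    intro x hx
    have hq : q'.1 = p'.1 + 1 := (step_some_elim hstep).2.1
    rcases List.mem_cons.1 hx with he | hs'
    · subst he; omega
    · have := ih rfl x hs'
      omega

lemma step_congr (scan scan' : List (List String)) (p : Int × Int)
    (hlen : scan'.length = scan.length)
    (hrow : PySem.List.pyGet? scan' (p.1 + 1) = PySem.List.pyGet? scan (p.1 + 1)) :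
    step scan' p = step scan p := by
  unfold step
  rw [hlen, hrow]

lemma IsStack_settle (scan : List (List String)) (st : Int × Int) (qr qc : Int)
    (hqr0 : 0 ≤ qr) :
    ∀ s, IsStack scan st s → (∀ p ∈ s, 0 ≤ p.1 ∧ p.1 < qr) →
      IsStack (settleAt scan qr qc) st s := by
  intro s hs
  induction hs with
  | base => intro _; exact IsStack.base
  | push hstk hstep ih =>
    rename_i p s' q
    intro hrows
    have hq := hrows q (by simp)
    have hp := hrows p (by simp)
    refine IsStack.push (ih (fun x hx => hrows x (by simp [hx]))) ?_
    rw [step_congr scan (settleAt scan qr qc) p (length_settleAt scan qr qc)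
      (pyGet?_settleAt_ne scan qr qc (p.1 + 1) (by omega) (by
        have hq1 : q.1 = p.1 + 1 := (step_some_elim hstep).2.1
        omega))]
    exact hstep

lemma stack_replay (scan : List (List String)) (st : Int × Int) :
    ∀ {s : List (Int × Int)} {p : Int × Int}, IsStack scan st (p :: s) →
      ∀ f, dropGrainB (f + s.length) scan st.1 st.2 = dropGrainB f scan p.1 p.2 := by
  intro s p h
  generalize hps : p :: s = l at h
  induction h generalizing p s with
  | base =>
    cases hps
    intro f; rfl
  | push hstk hstep ih =>
    rename_i p' s' q'
    cases hps
    intro f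
    have hrec := ih rfl (f + 1)
    have hstepu : dropGrainB (f + 1) scan p'.1 p'.2 = dropGrainB f scan q'.1 q'.2 := by
      obtain ⟨hlt, hq1, below, hget, hpick⟩ := step_some_elim hstep
      rw [dropGrainB, if_pos hlt, hget]
      dsimp only
      rw [hpick, hq1]
    calc dropGrainB (f + (p' :: s').length) scan st.1 st.2
        = dropGrainB (f + 1 + s'.length) scan st.1 st.2 := by
          rw [show f + (p' :: s').length = f + 1 + s'.length from by
            simp only [List.length_cons]; omega]
      _ = dropGrainB (f + 1) scan p'.1 p'.2 := hrec
      _ = dropGrainB f scan q'.1 q'.2 := hstepu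

-- dropGrainB fuel facts -------------------------------------------------------------------

lemma dropGrainB_mono (scan : List (List String)) :
    ∀ (fuel : Nat) (r c : Int) (x : Bool × List (List String)),
      dropGrainB fuel scan r c = some x → dropGrainB (fuel + 1) scan r c = some x := by
  intro fuel
  induction fuel with
  | zero => intro r c x h; simp [dropGrainB] at h
  | succ fuel ih =>
    intro r c x h
    rw [dropGrainB] at h
    rw [dropGrainB]
    by_cases hlt : r + 1 < (scan.length : Int)
    · rw [if_pos hlt] at h ⊢
      cases hget : PySem.List.pyGet? scan (r + 1) with
      | none => rw [hget] at h; simp at h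
      | some below =>
        rw [hget] at h
        dsimp only at h ⊢
        cases hpick : pickNext below c with
        | some c' =>
          rw [hpick] at h
          exact ih _ _ _ h
        | none =>
          rw [hpick] at h
          exact h
    · rw [if_neg hlt] at h ⊢
      exact h

lemma dropGrainB_mono_le (scan : List (List String)) (f g : Nat) (hfg : f ≤ g)
    (r c : Int) (x : Bool × List (List String)) (h : dropGrainB f scan r c = some x) :
    dropGrainB g scan r c = some x := by
  obtain ⟨k, rfl⟩ : ∃ k, g = f + k := ⟨g - f, by omega⟩
  clear hfg
  induction k with
  | zero => exact h
  | succ k ih => exact dropGrainB_mono scan (f + k) r c x ih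

lemma dropGrainB_total (scan : List (List String)) (w : Nat) (hRW : RW scan w) :
    ∀ (fuel : Nat) (r c : Int), 0 ≤ r → 1 ≤ c → c ≤ (w : Int) - 2 → 1 ≤ fuel →
      (scan.length : Int) ≤ r + fuel → ∃ x, dropGrainB fuel scan r c = some x := by
  intro fuel
  induction fuel with
  | zero => intro r c _ _ _ h1 _; omega
  | succ fuel ih =>
    intro r c hr hc1 hc2 _ hfl
    rw [dropGrainB]
    by_cases hlt : r + 1 < (scan.length : Int)
    · rw [if_pos hlt]
      have hget : PySem.List.pyGet? scan (r + 1) = some scan[(r + 1).toNat] := by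
        rw [PySem.List.pyGet?_of_nonneg _ (by omega),
          List.getElem?_eq_getElem (by omega : (r + 1).toNat < scan.length)]
      rw [hget]
      dsimp only
      have hmem : scan[(r + 1).toNat] ∈ scan := List.getElem_mem _
      obtain ⟨hlen, hw0, hw1⟩ := hRW.2 _ hmem
      have hw3 := hRW.1
      cases hpick : pickNext scan[(r + 1).toNat] c with
      | some c' =>
        obtain ⟨_, hb0, hbl, hdot⟩ := pickNext_some_facts _ c c' hpick
        have hne0 : c'.toNat ≠ 0 := fun h0 => hw0 (by rwa [← h0])
        have hnew : c'.toNat ≠ w - 1 := by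
          intro h0; apply hw1; rw [← h0]; exact hdot
        rw [hlen] at hbl
        exact ih (r + 1) c' (by omega) (by omega) (by omega) (by
          by_contra hf
          have hf0 : fuel = 0 := by omega
          subst hf0
          push_cast at hfl
          omega) (by push_cast at hfl ⊢; omega)
      | none =>
        have hgetr : PySem.List.pyGet? scan r = some scan[r.toNat] := by
          rw [PySem.List.pyGet?_of_nonneg _ hr,
            List.getElem?_eq_getElem (by omega : r.toNat < scan.length)]
        rw [hgetr]
        dsimp only
        obtain ⟨hlenr, _, _⟩ := hRW.2 scan[r.toNat] (List.getElem_mem _)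
        have hset1 : PySem.List.pySet? scan[r.toNat] c "O"
            = some (scan[r.toNat].set c.toNat "O") := by
          have h := PySem.List.pySet?_natCast (xs := scan[r.toNat]) (n := c.toNat) (v := "O")
            (by omega)
          rwa [show ((c.toNat : Int)) = c from by omega] at h
        rw [hset1]
        dsimp only
        have hset2 : PySem.List.pySet? scan r (scan[r.toNat].set c.toNat "O")
            = some (scan.set r.toNat (scan[r.toNat].set c.toNat "O")) := by
          have h := PySem.List.pySet?_natCast (xs := scan) (n := r.toNat)
            (v := scan[r.toNat].set c.toNat "O") (by omega)
          rwa [show ((r.toNat : Int)) = r from by omega] at h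
        rw [hset2]
        exact ⟨_, rfl⟩
    · rw [if_neg hlt]
      exact ⟨_, rfl⟩

-- The inner loops agree --------------------------------------------------------------------

/-- A's descent and B's descent from the same cell: either both hit a raise point, or both
    reach the void leaving the grid unchanged, or both settle the grain at the same cell. -/
lemma innerAB (scan : List (List String)) (st : Int × Int) (w : Nat) (hRW : RW scan w) :
    ∀ (fuel : Nat) (r c : Int) (s : List (Int × Int)),
      0 ≤ r → 1 ≤ c → c ≤ (w : Int) - 2 → IsStack scan st ((r, c) :: s) →
      (flowInnerA fuel scan r c ((r, c) :: s) = none ∧ dropGrainB fuel scan r c = none) ∨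
      (∃ ms, flowInnerA fuel scan r c ((r, c) :: s) = some (true, scan, ms) ∧
        dropGrainB fuel scan r c = some (false, scan)) ∨
      (∃ qr qc rest, flowInnerA fuel scan r c ((r, c) :: s) = some (false, settleAt scan qr qc, rest) ∧
        dropGrainB fuel scan r c = some (true, settleAt scan qr qc) ∧
        IsStack scan st ((qr, qc) :: rest) ∧ 0 ≤ qr ∧ qr + 1 < (scan.length : Int) ∧
        1 ≤ qc ∧ qc ≤ (w : Int) - 2 ∧
        cellS scan (qr + 1) (qc - 1) ≠ "." ∧ cellS scan (qr + 1) qc ≠ "." ∧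
        cellS scan (qr + 1) (qc + 1) ≠ ".") := by
  intro fuel
  induction fuel with
  | zero =>
    intro r c s _ _ _ _
    left
    exact ⟨rfl, rfl⟩
  | succ fuel ih =>
    intro r c s hr hc1 hc2 hstk
    by_cases hv : (scan.length : Int) ≤ r + 1
    · right; left
      refine ⟨(r, c) :: s, ?_, ?_⟩
      · rw [flowInnerA, if_pos hv]
      · rw [dropGrainB, if_neg (by omega)]
    · have hlt : r + 1 < (scan.length : Int) := by omega
      have hget : PySem.List.pyGet? scan (r + 1) = some scan[(r + 1).toNat] := by
        rw [PySem.List.pyGet?_of_nonneg _ (by omega),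
          List.getElem?_eq_getElem (by omega : (r + 1).toNat < scan.length)]
      set rb := scan[(r + 1).toNat] with hrb
      have hmem : rb ∈ scan := List.getElem_mem _
      obtain ⟨hlen, hw0, hw1⟩ := hRW.2 rb hmem
      have hw3 := hRW.1
      have hwid : c + 2 ≤ (rb.length : Int) := by omega
      obtain ⟨hg0, hg1, hg2⟩ := sliceGet3 rb c hc1 hwid
      have hpick := pickNext_eq rb c hc1 hwid
      have hcellB : ∀ d : Int, cellS scan (r + 1) d = rb.getD d.toNat "" := by
        intro d
        unfold cellS
        rw [getD_eq_getElem_of_lt _ _ _ (by omega : (r + 1).toNat < scan.length)]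
      by_cases hA : rb.getD c.toNat "" = "."
      · -- move straight down
        have hstk' : IsStack scan st ((r + 1, c) :: (r, c) :: s) := by
          refine IsStack.push hstk ?_
          unfold step
          dsimp only
          rw [if_pos hlt, hget]
          dsimp only
          rw [hpick, if_pos hA]
          rfl
        have hAeq : flowInnerA (fuel + 1) scan r c ((r, c) :: s)
            = flowInnerA fuel scan (r + 1) c ((r + 1, c) :: (r, c) :: s) := by
          rw [flowInnerA, if_neg (by omega), hget]
          dsimp only
          rw [hg1]
          dsimp only
          rw [hA, if_pos (beq_self_eq_true ".")]
        have hBeq : dropGrainB (fuel + 1) scan r c = dropGrainB fuel scan (r + 1) c := by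
          rw [dropGrainB, if_pos hlt, hget]
          dsimp only
          rw [hpick, if_pos hA]
        rw [hAeq, hBeq]
        exact ih (r + 1) c ((r, c) :: s) (by omega) hc1 hc2 hstk'
      · by_cases hB : rb.getD (c - 1).toNat "" = "."
        · -- down-left; the left wall forbids c - 1 = 0
          have hne0 : (c - 1).toNat ≠ 0 := fun h0 => hw0 (by rwa [← h0])
          have hc1' : 1 ≤ c - 1 := by omega
          have hstk' : IsStack scan st ((r + 1, c - 1) :: (r, c) :: s) := by
            refine IsStack.push hstk ?_
            unfold step
            dsimp only
            rw [if_pos hlt, hget]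
            dsimp only
            rw [hpick, if_neg hA, if_pos hB]
            rfl
          have hAeq : flowInnerA (fuel + 1) scan r c ((r, c) :: s)
              = flowInnerA fuel scan (r + 1) (c - 1) ((r + 1, c - 1) :: (r, c) :: s) := by
            rw [flowInnerA, if_neg (by omega), hget]
            dsimp only
            rw [hg1]
            dsimp only
            rw [if_neg (show ¬(rb.getD c.toNat "" == ".") = true from by simp only [beq_iff_eq]; exact hA), hg0]
            dsimp only
            rw [hB, if_pos (beq_self_eq_true ".")]
          have hBeq : dropGrainB (fuel + 1) scan r c = dropGrainB fuel scan (r + 1) (c - 1) := by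
            rw [dropGrainB, if_pos hlt, hget]
            dsimp only
            rw [hpick, if_neg hA, if_pos hB]
          rw [hAeq, hBeq]
          exact ih (r + 1) (c - 1) ((r, c) :: s) (by omega) hc1' (by omega) hstk'
        · by_cases hC : rb.getD (c + 1).toNat "" = "."
          · -- down-right; the right wall forbids c + 1 = w - 1
            have hnew : (c + 1).toNat ≠ w - 1 := by
              intro h0; apply hw1; rw [← h0]; exact hC
            have hc2' : c + 1 ≤ (w : Int) - 2 := by omega
            have hstk' : IsStack scan st ((r + 1, c + 1) :: (r, c) :: s) := by
              refine IsStack.push hstk ?_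
              unfold step
              dsimp only
              rw [if_pos hlt, hget]
              dsimp only
              rw [hpick, if_neg hA, if_neg hB, if_pos hC]
              rfl
            have hAeq : flowInnerA (fuel + 1) scan r c ((r, c) :: s)
                = flowInnerA fuel scan (r + 1) (c + 1) ((r + 1, c + 1) :: (r, c) :: s) := by
              rw [flowInnerA, if_neg (by omega), hget]
              dsimp only
              rw [hg1]
              dsimp only
              rw [if_neg (show ¬(rb.getD c.toNat "" == ".") = true from by simp only [beq_iff_eq]; exact hA), hg0]
              dsimp only
              rw [if_neg (show ¬(rb.getD (c - 1).toNat "" == ".") = true from by simp only [beq_iff_eq]; exact hB), hg2]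
              dsimp only
              rw [hC, if_pos (beq_self_eq_true ".")]
            have hBeq : dropGrainB (fuel + 1) scan r c = dropGrainB fuel scan (r + 1) (c + 1) := by
              rw [dropGrainB, if_pos hlt, hget]
              dsimp only
              rw [hpick, if_neg hA, if_neg hB, if_pos hC]
            rw [hAeq, hBeq]
            exact ih (r + 1) (c + 1) ((r, c) :: s) (by omega) (by omega) hc2' hstk'
          · -- settle at (r, c)
            right; right
            have hgetr : PySem.List.pyGet? scan r = some scan[r.toNat] := by
              rw [PySem.List.pyGet?_of_nonneg _ hr,
                List.getElem?_eq_getElem (by omega : r.toNat < scan.length)]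
            obtain ⟨hlenr, _, _⟩ := hRW.2 scan[r.toNat] (List.getElem_mem (by omega))
            have hset1 : PySem.List.pySet? scan[r.toNat] c "O"
                = some (scan[r.toNat].set c.toNat "O") := by
              have h := PySem.List.pySet?_natCast (xs := scan[r.toNat]) (n := c.toNat) (v := "O")
                (by omega)
              rwa [show ((c.toNat : Int)) = c from by omega] at h
            have hset2 : PySem.List.pySet? scan r (scan[r.toNat].set c.toNat "O")
                = some (scan.set r.toNat (scan[r.toNat].set c.toNat "O")) := by
              have h := PySem.List.pySet?_natCast (xs := scan) (n := r.toNat)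
                (v := scan[r.toNat].set c.toNat "O") (by omega)
              rwa [show ((r.toNat : Int)) = r from by omega] at h
            have hsettle : settleAt scan r c = scan.set r.toNat (scan[r.toNat].set c.toNat "O") := by
              unfold settleAt
              rw [getD_eq_getElem_of_lt _ _ _ (by omega : r.toNat < scan.length)]
            refine ⟨r, c, s, ?_, ?_, hstk, hr, hlt, hc1, hc2, ?_, ?_, ?_⟩
            · rw [flowInnerA, if_neg (by omega), hget]
              dsimp only
              rw [hg1]
              dsimp only
              rw [if_neg (show ¬(rb.getD c.toNat "" == ".") = true from by simp only [beq_iff_eq]; exact hA), hg0]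
              dsimp only
              rw [if_neg (show ¬(rb.getD (c - 1).toNat "" == ".") = true from by simp only [beq_iff_eq]; exact hB), hg2]
              dsimp only
              rw [if_neg (show ¬(rb.getD (c + 1).toNat "" == ".") = true from by simp only [beq_iff_eq]; exact hC),
                hgetr]
              dsimp only
              rw [hset1]
              dsimp only
              rw [hset2, hsettle]
              rfl
            · rw [dropGrainB, if_pos hlt, hget]
              dsimp only
              rw [hpick, if_neg hA, if_neg hB, if_neg hC, hgetr]
              dsimp only
              rw [hset1]
              dsimp only
              rw [hset2, hsettle]
            · rw [hcellB (c - 1)]; exact hB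
            · rw [hcellB c]; exact hA
            · rw [hcellB (c + 1)]; exact hC

-- Invariant bookkeeping -------------------------------------------------------------------

lemma RW_of_Inv (scan₀ scan : List (List String)) (w : Nat) (hRW : RW scan₀ w)
    (hInv : SandInv scan₀ scan) : RW scan w := by
  obtain ⟨hlen, hrow, hmono, _⟩ := hInv
  refine ⟨hRW.1, ?_⟩
  intro r hr
  obtain ⟨i, hi, hieq⟩ := List.getElem_of_mem hr
  have hw3 := hRW.1
  have hi0 : i < scan₀.length := by omega
  obtain ⟨hl0, hwl, hwr⟩ := hRW.2 scan₀[i] (List.getElem_mem _)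
  have hrl : r.length = w := by
    have := hrow i
    rw [getD_eq_getElem_of_lt _ _ _ hi, getD_eq_getElem_of_lt _ _ _ hi0, hieq] at this
    omega
  have hcell : ∀ c : Nat, c < w → scan₀[i].getD c "" ≠ "." → r.getD c "" ≠ "." := by
    intro c hcw hne
    have h0 := hmono (i : Int) (c : Int) (by
      unfold cellS
      rw [Int.toNat_natCast, Int.toNat_natCast, getD_eq_getElem_of_lt _ _ _ hi0]
      exact hne)
    unfold cellS at h0
    rw [Int.toNat_natCast, Int.toNat_natCast, getD_eq_getElem_of_lt _ _ _ hi0,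
      getD_eq_getElem_of_lt _ _ _ hi, hieq] at h0
    rw [← h0]
    exact hne
  exact ⟨hrl, hcell 0 (by omega) hwl, hcell (w - 1) (by omega) hwr⟩

lemma Inv_settle (scan₀ scan : List (List String)) (w : Nat) (hRW : RW scan₀ w)
    (hInv : SandInv scan₀ scan) (qr qc : Int) (hqr : 0 ≤ qr)
    (hqlt : qr + 1 < (scan.length : Int)) (hqc1 : 1 ≤ qc) (hqc2 : qc ≤ (w : Int) - 2)
    (hdot : cellS scan qr qc = ".")
    (hb1 : cellS scan (qr + 1) (qc - 1) ≠ ".") (hb2 : cellS scan (qr + 1) qc ≠ ".")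
    (hb3 : cellS scan (qr + 1) (qc + 1) ≠ ".") :
    SandInv scan₀ (settleAt scan qr qc) := by
  obtain ⟨hlen, hrow, hmono, hclos⟩ := hInv
  have hRWc := RW_of_Inv scan₀ scan w hRW ⟨hlen, hrow, hmono, hclos⟩
  have hqrl : qr.toNat < scan.length := by omega
  have hrowq : (scan.getD qr.toNat []).length = w := by
    rw [getD_eq_getElem_of_lt _ _ _ hqrl]
    exact (hRWc.2 _ (List.getElem_mem _)).1
  have hrow1 : (scan.getD (qr + 1).toNat []).length = w := by
    rw [getD_eq_getElem_of_lt _ _ _ (by omega : (qr + 1).toNat < scan.length)]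
    exact (hRWc.2 _ (List.getElem_mem _)).1
  have hqcl : qc.toNat < (scan.getD qr.toNat []).length := by omega
  have hcell := cellS_settleAt scan qr qc hqrl hqcl
  have hw3 := hRW.1
  refine ⟨by rw [length_settleAt]; exact hlen,
    fun i => by rw [rowLen_settleAt]; exact hrow i, ?_, ?_⟩
  · -- non-'.' cells of scan₀ are untouched: the settled cell was '.' in scan, hence in scan₀
    intro r c hne
    rw [hmono r c hne, hcell r c]
    split
    · rename_i hrc
      exfalso
      have hsame2 : cellS scan r c = cellS scan qr qc := by
        unfold cellS; rw [hrc.1, hrc.2]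
      have h2 := hmono r c hne
      rw [hsame2, hdot] at h2
      have hsame : cellS scan₀ r c = cellS scan₀ qr qc := by
        unfold cellS; rw [hrc.1, hrc.2]
      exact hne h2
    · rfl
  · -- every blocked cell of the new grid is marked by closRow scan₀
    intro r c h0r hrl h0c hcl hne
    rw [length_settleAt] at hrl
    rw [rowLen_settleAt] at hcl
    rw [hcell r c] at hne
    by_cases hrc : r.toNat = qr.toNat ∧ c.toNat = qc.toNat
    · have hreq : r = qr := by omega
      have hceq : c = qc := by
        have h01 : 0 ≤ qc := by omega
        omega
      rw [hreq, hceq]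
      have hwin : ∀ d : Int, qc - 1 ≤ d → d ≤ qc + 1 → cellS scan (qr + 1) d ≠ "." →
          closAt scan₀ (qr + 1) d = true := by
        intro d hd1 hd2 hnd
        exact hclos (qr + 1) d (by omega) (by omega) (by omega)
          (by rw [hrow1]; omega) hnd
      have h1 := hwin (qc - 1) (by omega) (by omega) hb1
      have h2 := hwin qc (by omega) (by omega) hb2
      have h3 := hwin (qc + 1) (by omega) (by omega) hb3
      exact closAt_stepUp scan₀ qr qc (by omega) (by omega) (by omega)
        (by rw [← hrow qr.toNat, hrowq]; omega) h1 h2 h3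
    · rw [if_neg hrc] at hne
      exact hclos r c h0r (by omega) h0c (by omega) hne

lemma Inv_refl (scan : List (List String)) : SandInv scan scan := by
  refine ⟨rfl, fun _ => rfl, fun _ _ _ => rfl, ?_⟩
  intro r c h0r hrl h0c hcl hne
  exact closAt_base scan r c h0r hrl h0c hcl hne

/-- A stack cell that is not the source sits on a '.' cell (it was stepped into). -/
lemma IsStack_head_dot (scan : List (List String)) (st : Int × Int)
    {q : Int × Int} {rest : List (Int × Int)} (h : IsStack scan st (q :: rest))
    (hrows : ∀ x ∈ rest, 0 ≤ x.1) (hne : rest ≠ []) : cellS scan q.1 q.2 = "." := by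
  cases h with
  | base => exact absurd rfl hne
  | push hstk hstep =>
    rename_i p s
    have hp : 0 ≤ p.1 := hrows p (by simp)
    obtain ⟨hlt, hq1, below, hget, hpick⟩ := step_some_elim hstep
    obtain ⟨_, hb0, hbl, hdot⟩ := pickNext_some_facts below p.2 q.2 hpick
    have hbelow : below = scan.getD (p.1 + 1).toNat [] := by
      rw [PySem.List.pyGet?_of_nonneg _ (by omega)] at hget
      rw [List.getD_eq_getElem?_getD, hget]
      rfl
    unfold cellS
    rw [hq1, ← hbelow]
    exact hdot

-- The outer loops agree, in lockstep ------------------------------------------------------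

lemma IsStack_singleton {scan : List (List String)} {st q : Int × Int}
    (h : IsStack scan st [q]) : q = st := by cases h; rfl

lemma IsStack_pop {scan : List (List String)} {st q : Int × Int} {rest : List (Int × Int)}
    (h : IsStack scan st (q :: rest)) (hne : rest ≠ []) : IsStack scan st rest := by
  cases h with
  | base => exact absurd rfl hne
  | push hstk _ => exact hstk

lemma outerAB (scan₀ : List (List String)) (st : Int × Int) (w : Nat)
    (hRW0 : RW scan₀ w) (h0 : 0 ≤ st.1) (hc1 : 1 ≤ st.2) (hc2 : st.2 ≤ (w : Int) - 2)
    (hclos : ¬(closAt scan₀ (st.1 + 1) (st.2 - 1) = true ∧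
      closAt scan₀ (st.1 + 1) st.2 = true ∧ closAt scan₀ (st.1 + 1) (st.2 + 1) = true)) :
    ∀ (n : Nat) (scan : List (List String)) (cnt : Int) (s : List (Int × Int)),
      SandInv scan₀ scan → IsStack scan st s →
      flowOuterA n scan cnt s = flowOuterB n scan cnt st := by
  intro n
  induction n with
  | zero => intro scan cnt s _ _; rfl
  | succ n ih =>
    intro scan cnt s hInv hstk
    obtain ⟨p, s', rfl⟩ : ∃ p s', s = p :: s' := by
      cases hstk with
      | base => exact ⟨st, [], rfl⟩
      | push h hs => rename_i p s q; exact ⟨q, p :: s, rfl⟩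
    obtain ⟨pr, pc⟩ := p
    have hRWc : RW scan w := RW_of_Inv scan₀ scan w hRW0 hInv
    have hfacts := IsStack_elem_facts scan st w hRWc h0 hc1 hc2 _ hstk
    obtain ⟨hp0, hp1, hp2⟩ := hfacts (pr, pc) (by simp)
    obtain ⟨x, hx⟩ := dropGrainB_total scan w hRWc (scan.length + 2) pr pc hp0 hp1 hp2
      (by omega) (by push_cast; omega)
    have hstB : dropGrainB (scan.length + 2) scan st.1 st.2 = some x := by
      obtain ⟨y, hy⟩ := dropGrainB_total scan w hRWc (scan.length + 2) st.1 st.2 h0 hc1 hc2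
        (by omega) (by push_cast; omega)
      have h1 : dropGrainB (scan.length + 2 + s'.length) scan st.1 st.2 = some x := by
        rw [stack_replay scan st hstk (scan.length + 2)]; exact hx
      have h2 : dropGrainB (scan.length + 2 + s'.length) scan st.1 st.2 = some y :=
        dropGrainB_mono_le scan _ _ (by omega) _ _ _ hy
      rw [hy, h1.symm.trans h2]
    have hinner := innerAB scan st w hRWc (scan.length + 2) pr pc s' hp0 hp1 hp2 hstk
    rcases hinner with ⟨hAn, hBn⟩ | ⟨ms, hAv, hBv⟩ |
      ⟨qr, qc, rest, hAs, hBs, hstk2, hqr0, hqlt, hqc1, hqc2, hw1, hw2, hw3⟩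
    · rw [hBn] at hx; cases hx
    · -- the grain reaches the void: both sides stop with (scan, cnt)
      have hxv : x = (false, scan) := by rw [hBv] at hx; cases hx; rfl
      subst hxv
      show flowOuterA (n + 1) scan cnt ((pr, pc) :: s') = flowOuterB (n + 1) scan cnt st
      rw [flowOuterA, flowOuterB, hAv, hstB]
    · -- the grain settles at (qr, qc): both sides recurse on the updated grid
      have hxs : x = (true, settleAt scan qr qc) := by rw [hBs] at hx; cases hx; rfl
      subst hxs
      -- the settled cell is never the source (its window can never be fully plugged)
      have hrest : rest ≠ [] := by
        intro hnil
        subst hnil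
        have hqst : (qr, qc) = st := IsStack_singleton hstk2
        have hlt1 : (qr + 1).toNat < scan.length := by omega
        have hrow1 : ((scan.getD (qr + 1).toNat []).length : Int) = (w : Int) := by
          rw [getD_eq_getElem_of_lt _ _ _ hlt1]
          have h := (hRWc.2 scan[(qr + 1).toNat] (List.getElem_mem hlt1)).1
          omega
        have hget4 := hInv.2.2.2
        have hcl1 := hget4 (qr + 1) (qc - 1) (by omega) (by omega) (by omega)
          (by rw [hrow1]; omega) hw1
        have hcl2 := hget4 (qr + 1) qc (by omega) (by omega) (by omega)
          (by rw [hrow1]; omega) hw2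
        have hcl3 := hget4 (qr + 1) (qc + 1) (by omega) (by omega) (by omega)
          (by rw [hrow1]; omega) hw3
        rw [show qr = st.1 from congrArg Prod.fst hqst, show qc = st.2 from congrArg Prod.snd hqst]
          at hcl1 hcl2 hcl3
        exact hclos ⟨hcl1, hcl2, hcl3⟩
      have hdot : cellS scan qr qc = "." :=
        IsStack_head_dot scan st hstk2
          (fun y hy => (IsStack_elem_facts scan st w hRWc h0 hc1 hc2 _
            (IsStack_pop hstk2 hrest) y hy).1) hrest
      have hInv' : SandInv scan₀ (settleAt scan qr qc) :=
        Inv_settle scan₀ scan w hRW0 hInv qr qc hqr0 hqlt hqc1 hqc2 hdot hw1 hw2 hw3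
      have hstk' : IsStack (settleAt scan qr qc) st rest := by
        refine IsStack_settle scan st qr qc hqr0 rest (IsStack_pop hstk2 hrest) ?_
        intro y hy
        exact ⟨(IsStack_elem_facts scan st w hRWc h0 hc1 hc2 _
          (IsStack_pop hstk2 hrest) y hy).1, IsStack_rows_lt hstk2 y hy⟩
      show flowOuterA (n + 1) scan cnt ((pr, pc) :: s') = flowOuterB (n + 1) scan cnt st
      rw [flowOuterA, flowOuterB, hAs, hstB]
      exact ih (settleAt scan qr qc) (cnt + 1) rest hInv' hstk'

-- Straight-chute descent (Pre_'s second disjunct): the grain falls clean through -----------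

lemma innerA_void (scan : List (List String)) :
    ∀ (fuel : Nat) (r c : Int) (moves : List (Int × Int)),
      0 ≤ r → 1 ≤ c →
      (∀ row ∈ scan.drop (r + 1).toNat, c < (row.length : Int) ∧ row.getD c.toNat "" = ".") →
      scan.length ≤ fuel + r.toNat → 1 ≤ fuel →
      ∃ ms, flowInnerA fuel scan r c moves = some (true, scan, ms) := by
  intro fuel
  induction fuel with
  | zero => intro r c moves _ _ _ _ h1; omega
  | succ fuel ih =>
    intro r c moves h0 hc hch hf _
    by_cases hv : (scan.length : Int) ≤ r + 1
    · exact ⟨moves, by rw [flowInnerA, if_pos hv]⟩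
    · have hrn : (r + 1).toNat < scan.length := by omega
      have hget : PySem.List.pyGet? scan (r + 1) = some scan[(r + 1).toNat] := by
        rw [PySem.List.pyGet?_of_nonneg _ (by omega), List.getElem?_eq_getElem hrn]
      have hmem : scan[(r + 1).toNat] ∈ scan.drop (r + 1).toNat := by
        rw [List.drop_eq_getElem_cons hrn]; exact List.mem_cons_self
      obtain ⟨hlen, hdotc⟩ := hch _ hmem
      have hch' : ∀ row ∈ scan.drop (r + 1 + 1).toNat,
          c < (row.length : Int) ∧ row.getD c.toNat "" = "." := by
        intro row hrow
        apply hch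
        rw [show (r + 1 + 1).toNat = (r + 1).toNat + 1 from by omega, ← List.drop_drop] at hrow
        exact List.mem_of_mem_drop hrow
      obtain ⟨ms, hms⟩ := ih (r + 1) c ((r + 1, c) :: moves) (by omega) hc hch'
        (by omega) (by omega)
      refine ⟨ms, ?_⟩
      rw [flowInnerA, if_neg hv, hget]
      simp only [sliceMid scan[(r + 1).toNat] c hc hlen, hdotc, beq_self_eq_true, if_pos]
      exact hms

lemma dropB_void (scan : List (List String)) :
    ∀ (fuel : Nat) (r c : Int), 0 ≤ r → 0 ≤ c →
      (∀ row ∈ scan.drop (r + 1).toNat, c < (row.length : Int) ∧ row.getD c.toNat "" = ".") →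
      scan.length ≤ fuel + r.toNat → 1 ≤ fuel →
      dropGrainB fuel scan r c = some (false, scan) := by
  intro fuel
  induction fuel with
  | zero => intro r c _ _ _ _ h1; omega
  | succ fuel ih =>
    intro r c h0 hc hch hf _
    by_cases hv : (scan.length : Int) ≤ r + 1
    · rw [dropGrainB, if_neg (by omega)]
    · have hrn : (r + 1).toNat < scan.length := by omega
      have hget : PySem.List.pyGet? scan (r + 1) = some scan[(r + 1).toNat] := by
        rw [PySem.List.pyGet?_of_nonneg _ (by omega), List.getElem?_eq_getElem hrn]
      have hmem : scan[(r + 1).toNat] ∈ scan.drop (r + 1).toNat := by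
        rw [List.drop_eq_getElem_cons hrn]; exact List.mem_cons_self
      obtain ⟨hlen, hdotc⟩ := hch _ hmem
      have hpick : pickNext scan[(r + 1).toNat] c = some c := by
        unfold pickNext
        exact List.find?_cons_of_pos (by
          rw [decide_eq_true hc, decide_eq_true hlen, hdotc]; simp)
      have hch' : ∀ row ∈ scan.drop (r + 1 + 1).toNat,
          c < (row.length : Int) ∧ row.getD c.toNat "" = "." := by
        intro row hrow
        apply hch
        rw [show (r + 1 + 1).toNat = (r + 1).toNat + 1 from by omega, ← List.drop_drop] at hrow
        exact List.mem_of_mem_drop hrow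
      rw [dropGrainB, if_pos (by omega : r + 1 < (scan.length : Int)), hget]
      dsimp only
      rw [hpick]
      exact ih (r + 1) c (by omega) hc hch' (by omega) (by omega)

-- ===== VERDICT (by name: the statement is the Claim_ definition above) =====
theorem flow_the_sand_spec : Claim_equal_flow_the_sand := by
  intro scan start_idx _ hPre
  obtain ⟨r0, c0⟩ := start_idx
  unfold Spec_flow_the_sand flow_the_sand flow_the_sand_alt
  rcases hPre with hv | ⟨h0, hc, hch⟩ | ⟨h0, hlt, hw3, hrect, hc1, hc2, hclos⟩
  · -- the source is already past the last row
    rw [show scan.foldl (fun a r => a + r.length) 0 + 2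
        = (scan.foldl (fun a r => a + r.length) 0 + 1) + 1 from rfl]
    rw [flowOuterA, flowOuterB]
    rw [show scan.length + 2 = (scan.length + 1) + 1 from rfl]
    rw [flowInnerA, if_pos hv, dropGrainB, if_neg (by omega)]
  · -- clear chute below the source
    rw [show scan.foldl (fun a r => a + r.length) 0 + 2
        = (scan.foldl (fun a r => a + r.length) 0 + 1) + 1 from rfl]
    rw [flowOuterA, flowOuterB]
    obtain ⟨ms, hms⟩ := innerA_void scan (scan.length + 2) r0 c0 [(r0, c0)] h0 hc hch
      (by omega) (by omega)
    have hb := dropB_void scan (scan.length + 2) r0 c0 h0 (by omega) hch (by omega) (by omega)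
    rw [hms, hb]
  · -- the real simulation: rectangular walled grid with an unpluggable source window
    exact outerAB scan (r0, c0) (scan.headD []).length ⟨hw3, hrect⟩ h0 hc1 hc2 hclos
      (scan.foldl (fun a r => a + r.length) 0 + 2) scan 0 [(r0, c0)]
      (Inv_refl scan) IsStack.base
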